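-- pv_equiv track=rewrite | github.com/xin-huang/gaishi | gaishi/preprocessors/genotype_matrix_preprocessor.py | _create_sample_name_list
-- ===== SOURCE A (Python) =====
-- def _create_sample_name_list(
--
--     samples: list,
--     ploidy: int,
--     is_phased: bool,
-- ) -> list[str]:
--     """
--     Create a list of sample names, including phased information if applicable.
--
--     Parameters
--     ----------
--     samples : list of str
--         List of original sample identifiers.
--     ploidy : int
--         The ploidy level of the samples (e.g., 2 for diploid).
--     is_phased : bool
--         Indicates if the sample names should include phased information.
--
--     Returns
--     -------
--     list of str
--         A list of sample names, with phased information if applicable.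
--     """
--
--     if is_phased:
--         num_samples = len(samples) * ploidy
--     else:
--         num_samples = len(samples)
--
--     samples = [
--         f"{samples[int(i/ploidy)]}_{i%ploidy+1}" if is_phased else samples[i]
--         for i in range(num_samples)
--     ]
--
--     return samples
-- ===== SOURCE B (Python) =====
-- def _create_sample_name_list(
--     samples: list,
--     ploidy: int,
--     is_phased: bool,
-- ) -> list[str]:
--     """Nested two-level build: per sample, per copy number; unphased is a shallow copy."""
--     if not is_phased:
--         return list(samples)
--     result = []
--     for sample in samples:
--         for j in range(ploidy):
--             result.append(f"{sample}_{j + 1}")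
--     return result
-- ===== Notes on version B (the rewrite author's own statement) =====
-- stated objective: simpler
-- what changed: Replaces the flat single-index comprehension with int(i/ploidy) and i%ploidy arithmetic by a direct nested loop over samples and copy numbers (and a plain shallow copy in the unphased branch).
import Mathlib
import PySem

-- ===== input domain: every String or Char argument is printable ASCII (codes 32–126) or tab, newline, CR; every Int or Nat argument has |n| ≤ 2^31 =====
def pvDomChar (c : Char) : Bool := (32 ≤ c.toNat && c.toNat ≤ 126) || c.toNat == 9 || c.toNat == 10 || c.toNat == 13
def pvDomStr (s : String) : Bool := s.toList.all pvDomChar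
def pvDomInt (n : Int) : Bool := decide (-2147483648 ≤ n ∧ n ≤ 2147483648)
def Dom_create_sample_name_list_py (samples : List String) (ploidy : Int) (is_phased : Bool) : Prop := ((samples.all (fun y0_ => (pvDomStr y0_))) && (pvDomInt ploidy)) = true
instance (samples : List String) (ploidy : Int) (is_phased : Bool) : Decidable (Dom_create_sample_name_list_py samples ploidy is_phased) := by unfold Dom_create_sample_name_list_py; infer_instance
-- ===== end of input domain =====

-- B replaces A's flat single-index comprehension (div/mod arithmetic) with a nested
-- per-sample / per-copy build; objective: simpler. Return values proved equal on all inputs.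

-- ===== PORT A =====
-- Literal port of A. The comprehension indices are always in range on every executed
-- iteration (0 ≤ int(i/ploidy) < len(samples), resp. 0 ≤ i < len(samples)), so the
-- pyGetD default is never reached; int(i/ploidy) is PySem.Int.truncdiv (exact for
-- |i|, |ploidy| < 2^53, which covers every index a list can have here).
def create_sample_name_list_py (samples : List String) (ploidy : Int) (is_phased : Bool) : List String :=
  let num_samples : Int := if is_phased then (samples.length : Int) * ploidy else (samples.length : Int)
  (PySem.List.pyRange 0 num_samples 1).map (fun i =>
    if is_phased then
      PySem.List.pyGetD samples (PySem.Int.truncdiv i ploidy) "" ++ "_" ++ PySem.Int.toStr (PySem.Int.mod i ploidy + 1)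
    else
      PySem.List.pyGetD samples i "")

-- ===== PORT B =====
def create_sample_name_list_py_alt (samples : List String) (ploidy : Int) (is_phased : Bool) : List String :=
  if !is_phased then samples
  else
    samples.flatMap (fun sample =>
      (PySem.List.pyRange 0 ploidy 1).map (fun j => sample ++ "_" ++ PySem.Int.toStr (j + 1)))

-- ===== PRECONDITION & SPEC =====
def Spec_create_sample_name_list_py (samples : List String) (ploidy : Int) (is_phased : Bool) (out : List String) : Prop := out = create_sample_name_list_py_alt samples ploidy is_phased
instance (samples : List String) (ploidy : Int) (is_phased : Bool) (out : List String) : Decidable (Spec_create_sample_name_list_py samples ploidy is_phased out) := by unfold Spec_create_sample_name_list_py; infer_instance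

-- ===== CLAIM (what is proved, stated in full; the proofs are below) =====
def Claim_equal_create_sample_name_list_py : Prop := ∀ (samples : List String) (ploidy : Int) (is_phased : Bool), Dom_create_sample_name_list_py samples ploidy is_phased → Spec_create_sample_name_list_py samples ploidy is_phased (create_sample_name_list_py samples ploidy is_phased)

-- ===== LEMMAS AND PROOFS =====

-- range shift: pyRange (0+c) (n+c) is pyRange 0 n translated by c
lemma pyRange_one_map_add (c : Int) : ∀ (n : Nat),
    PySem.List.pyRange c ((n : Int) + c) 1 = (PySem.List.pyRange 0 (n : Int) 1).map (· + c) := by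
  intro n
  induction n with
  | zero => simp [PySem.List.pyRange_one_eq_nil]
  | succ m ih =>
      have h1 : ((m + 1 : Nat) : Int) + c = ((m : Nat) : Int) + c + 1 := by push_cast; ring
      have h2 : ((m + 1 : Nat) : Int) = ((m : Nat) : Int) + 1 := by push_cast; ring
      rw [h1, PySem.List.pyRange_one_succ_right (by omega), h2,
          PySem.List.pyRange_one_succ_right (by omega), List.map_append, ih]
      simp

-- the phased branch: flat index enumeration with div/mod equals the nested build
lemma phased_key (p : Int) (hp : 0 < p) : ∀ (xs : List String),
    (PySem.List.pyRange 0 ((xs.length : Int) * p) 1).map (fun i =>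
        PySem.List.pyGetD xs (PySem.Int.truncdiv i p) "" ++ "_" ++ PySem.Int.toStr (PySem.Int.mod i p + 1))
      = xs.flatMap (fun s => (PySem.List.pyRange 0 p 1).map (fun j => s ++ "_" ++ PySem.Int.toStr (j + 1))) := by
  intro xs
  induction xs with
  | nil => simp [PySem.List.pyRange_one_eq_nil]
  | cons x xs ih =>
      have hsplit : PySem.List.pyRange 0 (((x :: xs).length : Int) * p) 1
          = PySem.List.pyRange 0 p 1 ++ PySem.List.pyRange p (((xs.length : Int) * p) + p) 1 := by
        have : ((x :: xs).length : Int) * p = ((xs.length : Int) * p) + p := by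
          simp [List.length_cons]; ring
        rw [this, PySem.List.pyRange_one_append 0 p (((xs.length : Int) * p) + p) (le_of_lt hp)
              (by nlinarith [Int.natCast_nonneg xs.length])]
      have hNp : (((xs.length : Int)) * p) = (((xs.length * p.toNat : Nat)) : Int) := by
        push_cast [Int.toNat_of_nonneg (le_of_lt hp)]; ring
      rw [hsplit, List.map_append, List.flatMap_cons]
      congr 1
      · -- first block: indices 0 ≤ i < p pick the head with copy number i+1
        apply List.map_congr_left
        intro i hi
        rw [PySem.List.mem_pyRange_one] at hi
        have hd : PySem.Int.truncdiv i p = 0 := by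
          show i.tdiv p = 0
          rw [Int.tdiv_eq_ediv_of_nonneg hi.1]
          exact Int.ediv_eq_zero_of_lt hi.1 hi.2
        have hm : PySem.Int.mod i p = i := by
          rw [PySem.Int.mod_eq_emod_of_pos hp, Int.emod_eq_of_lt hi.1 hi.2]
        simp [hd, hm]
      · -- remaining blocks: shift indices by p and use the induction hypothesis on the tail
        rw [hNp, pyRange_one_map_add p, List.map_map, ← hNp, ← ih]
        apply List.map_congr_left
        intro i hi
        rw [PySem.List.mem_pyRange_one] at hi
        have hd : PySem.Int.truncdiv (i + p) p = PySem.Int.truncdiv i p + 1 := by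
          show (i + p).tdiv p = i.tdiv p + 1
          rw [Int.tdiv_eq_ediv_of_nonneg (by linarith), Int.tdiv_eq_ediv_of_nonneg hi.1,
              show i + p = i + 1 * p by ring, Int.add_mul_ediv_right i 1 (by linarith : p ≠ 0)]
        have hq0 : 0 ≤ PySem.Int.truncdiv i p := by
          show 0 ≤ i.tdiv p
          rw [Int.tdiv_eq_ediv_of_nonneg hi.1]
          exact Int.ediv_nonneg hi.1 (le_of_lt hp)
        have hm : PySem.Int.mod (i + p) p = PySem.Int.mod i p := by
          rw [PySem.Int.mod_eq_emod_of_pos hp, PySem.Int.mod_eq_emod_of_pos hp,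
              show i + p = i + p * 1 by ring, Int.add_mul_emod_self_left]
        have hget : PySem.List.pyGetD (x :: xs) (PySem.Int.truncdiv i p + 1) ""
            = PySem.List.pyGetD xs (PySem.Int.truncdiv i p) "" := by
          obtain ⟨q, hq⟩ := Int.eq_ofNat_of_zero_le hq0
          rw [hq]
          have : ((q : Int) + 1) = ((q + 1 : Nat) : Int) := by push_cast; ring
          rw [this, PySem.List.pyGetD_natCast, PySem.List.pyGetD_natCast]
          simp
        simp only [Function.comp, hd, hm, hget]

-- ===== VERDICT (by name: the statement is the Claim_ definition above) =====
theorem create_sample_name_list_py_spec : Claim_equal_create_sample_name_list_py := by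
  intro samples ploidy is_phased _
  unfold Spec_create_sample_name_list_py create_sample_name_list_py create_sample_name_list_py_alt
  cases is_phased with
  | false =>
      simpa using PySem.List.map_pyGetD_pyRange_zero' samples ""
  | true =>
      simp only [Bool.not_true, if_true]
      by_cases hp : 0 < ploidy
      · exact phased_key ploidy hp samples
      · rw [not_lt] at hp
        rw [PySem.List.pyRange_one_eq_nil (by nlinarith [Int.natCast_nonneg samples.length] : (samples.length : Int) * ploidy ≤ 0),
           PySem.List.pyRange_one_eq_nil hp]
        simp
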